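-- pv_equiv track=rewrite | github.com/beanlab/byu_pytest_utils | byu_pytest_utils/html/html_renderer.py | _build_comparison_strings
-- ===== SOURCE A (Python) =====
-- BLUE = "rgba(255, 99, 71, 0.4)"
--
-- GREEN = "rgba(50, 205, 50, 0.8)"
--
-- RED = "rgba(100, 149, 237, 0.4)"
--
-- def _build_comparison_strings(obs: str, exp: str, gap: str) -> tuple[str, str]:
--     """
--     Build HTML strings for observed and expected values with color-coded background styles.
--     Wraps entire substrings in a single span tag instead of individual characters.
--     """
--     def wrap_span(content, color):
--         return f'<span style="background-color:{color}; box-shadow: 0 0 0 {color};">{content}</span>'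
--
--     observed, expected = '', ''
--     current_obs, current_exp = '', ''
--     current_obs_color, current_exp_color = None, None
--
--     for o, e in zip(obs, exp):
--         if o == gap:
--             if current_obs_color != GREEN:
--                 if current_obs:
--                     observed += wrap_span(current_obs, current_obs_color)
--                 current_obs = o
--                 current_obs_color = GREEN
--             else:
--                 current_obs += o
--         elif e == gap:
--             if current_exp_color != RED:
--                 if current_exp:
--                     expected += wrap_span(current_exp, current_exp_color)
--                 current_exp = e
--                 current_exp_color = RED
--             else:
--                 current_exp += e
--         elif o != e:
--             if current_obs_color != BLUE:
--                 if current_obs: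
--                     observed += wrap_span(current_obs, current_obs_color)
--                 current_obs = o
--                 current_obs_color = BLUE
--             else:
--                 current_obs += o
--
--             if current_exp_color != BLUE:
--                 if current_exp:
--                     expected += wrap_span(current_exp, current_exp_color)
--                 current_exp = e
--                 current_exp_color = BLUE
--             else:
--                 current_exp += e
--         else:
--             if current_obs:
--                 observed += wrap_span(current_obs, current_obs_color)
--                 current_obs = ''
--                 current_obs_color = None
--             if current_exp:
--                 expected += wrap_span(current_exp, current_exp_color)
--                 current_exp = ''
--                 current_exp_color = None
--             observed += o
--             expected += e
--
--     # Add remaining substrings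
--     if current_obs:
--         observed += wrap_span(current_obs, current_obs_color)
--     if current_exp:
--         expected += wrap_span(current_exp, current_exp_color)
--
--     # Handle remaining characters in longer strings
--     if len(obs) > len(exp):
--         observed += wrap_span(obs[len(exp):], BLUE)
--     elif len(exp) > len(obs):
--         expected += wrap_span(exp[len(obs):], BLUE)
--
--     return observed, expected
-- ===== SOURCE B (Python) =====
-- BLUE = "rgba(255, 99, 71, 0.4)"
--
-- GREEN = "rgba(50, 205, 50, 0.8)"
--
-- RED = "rgba(100, 149, 237, 0.4)"
--
--
-- def _build_comparison_strings(obs: str, exp: str, gap: str) -> tuple[str, str]: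
--     """Two-pass re-implementation: classify each zipped position into per-side
--     color tokens, then render each side by grouping consecutive equal-color runs."""
--     def wrap_span(content, color):
--         return f'<span style="background-color:{color}; box-shadow: 0 0 0 {color};">{content}</span>'
--
--     def obs_classify(o, e):
--         if o == gap:
--             return [(o, GREEN)]
--         if e == gap:
--             return []
--         if o != e:
--             return [(o, BLUE)]
--         return [(o, None)]
--
--     def exp_classify(o, e):
--         if o == gap:
--             return []
--         if e == gap:
--             return [(e, RED)]
--         if o != e:
--             return [(e, BLUE)]
--         return [(e, None)]
--
--     pairs = list(zip(obs, exp))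
--     obs_tokens = [t for o, e in pairs for t in obs_classify(o, e)]
--     exp_tokens = [t for o, e in pairs for t in exp_classify(o, e)]
--
--     def render(tokens):
--         out = []
--         i = 0
--         n = len(tokens)
--         while i < n:
--             color = tokens[i][1]
--             j = i
--             while j < n and tokens[j][1] == color:
--                 j += 1
--             chunk = ''.join(c for c, _ in tokens[i:j])
--             out.append(chunk if color is None else wrap_span(chunk, color))
--             i = j
--         return ''.join(out)
--
--     observed = render(obs_tokens)
--     expected = render(exp_tokens)
--     if len(obs) > len(exp):
--         observed += wrap_span(obs[len(exp):], BLUE)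
--     elif len(exp) > len(obs):
--         expected += wrap_span(exp[len(obs):], BLUE)
--     return observed, expected
-- ===== Notes on version B (the rewrite author's own statement) =====
-- stated objective: alternative
-- what changed: Replaces A's single-pass six-variable streaming state machine (pending run buffers and colors flushed on color change) with a two-pass decomposition: first classify each zipped position into per-side (char, color) tokens, then render each side by grouping maximal runs of equal color into one span (or raw text for plain runs).
import Mathlib
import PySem

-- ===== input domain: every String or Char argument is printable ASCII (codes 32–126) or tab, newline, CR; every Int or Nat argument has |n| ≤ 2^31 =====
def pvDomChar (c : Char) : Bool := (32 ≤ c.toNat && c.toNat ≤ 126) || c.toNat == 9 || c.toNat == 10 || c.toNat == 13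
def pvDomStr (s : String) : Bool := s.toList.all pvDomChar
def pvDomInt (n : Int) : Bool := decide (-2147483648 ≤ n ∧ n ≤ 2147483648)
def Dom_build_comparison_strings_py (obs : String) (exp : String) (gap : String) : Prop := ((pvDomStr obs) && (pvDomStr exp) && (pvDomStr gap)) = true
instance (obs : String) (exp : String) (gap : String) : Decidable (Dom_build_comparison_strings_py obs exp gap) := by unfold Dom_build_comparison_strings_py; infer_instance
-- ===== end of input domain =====

-- B replaces A's six-variable streaming state machine by a two-pass decomposition
-- (classify each zipped position into per-side color tokens, then render runs of
-- equal color); objective: alternative decomposition, same value (return only; no mutation).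

-- ===== PORT A =====
-- Strings are handled as List Char internally (exact for the chars involved); the
-- String.ofList conversion happens once on the final outputs of each port.
def pvBLUE : List Char := "rgba(255, 99, 71, 0.4)".toList
def pvGREEN : List Char := "rgba(50, 205, 50, 0.8)".toList
def pvRED : List Char := "rgba(100, 149, 237, 0.4)".toList

def pvWrap (content color : List Char) : List Char :=
  "<span style=\"background-color:".toList ++ color ++ "; box-shadow: 0 0 0 ".toList
    ++ color ++ ";\">".toList ++ content ++ "</span>".toList

-- Python f-string renders a None color as "None" (unreachable in practice, ported faithfully)
def pvColorStr : Option (List Char) → List Char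
  | none => "None".toList
  | some c => c

-- Python's repeated `if current: acc += wrap_span(current, color)` pattern
def pvFlush (acc run : List Char) (col : Option (List Char)) : List Char :=
  if run ≠ [] then acc ++ pvWrap run (pvColorStr col) else acc

-- one iteration of A's loop; state = ((observed, current_obs, current_obs_color), (expected, current_exp, current_exp_color))
def pvStepA (gapL : List Char)
    (st : (List Char × List Char × Option (List Char)) × (List Char × List Char × Option (List Char)))
    (p : Char × Char) :
    (List Char × List Char × Option (List Char)) × (List Char × List Char × Option (List Char)) :=
  match st, p with
  | ((observed, cur_obs, oc), (expected, cur_exp, ec)), (o, e) =>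
    if [o] = gapL then
      ((if oc ≠ some pvGREEN then (pvFlush observed cur_obs oc, [o], some pvGREEN)
        else (observed, cur_obs ++ [o], oc)),
       (expected, cur_exp, ec))
    else if [e] = gapL then
      ((observed, cur_obs, oc),
       (if ec ≠ some pvRED then (pvFlush expected cur_exp ec, [e], some pvRED)
        else (expected, cur_exp ++ [e], ec)))
    else if o ≠ e then
      ((if oc ≠ some pvBLUE then (pvFlush observed cur_obs oc, [o], some pvBLUE)
        else (observed, cur_obs ++ [o], oc)),
       (if ec ≠ some pvBLUE then (pvFlush expected cur_exp ec, [e], some pvBLUE)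
        else (expected, cur_exp ++ [e], ec)))
    else
      ((pvFlush observed cur_obs oc ++ [o], [], none),
       (pvFlush expected cur_exp ec ++ [e], [], none))

def build_comparison_strings_py (obs : String) (exp : String) (gap : String) : String × String :=
  let st := (List.zip obs.toList exp.toList).foldl (pvStepA gap.toList) (([], [], none), ([], [], none))
  let observed := pvFlush st.1.1 st.1.2.1 st.1.2.2
  let expected := pvFlush st.2.1 st.2.2.1 st.2.2.2
  if obs.toList.length > exp.toList.length then
    (String.ofList (observed ++ pvWrap (obs.toList.drop exp.toList.length) pvBLUE), String.ofList expected)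
  else if exp.toList.length > obs.toList.length then
    (String.ofList observed, String.ofList (expected ++ pvWrap (exp.toList.drop obs.toList.length) pvBLUE))
  else (String.ofList observed, String.ofList expected)

-- ===== PORT B =====
-- token = (char, color); color none = plain; classification may yield no token for a side
def pvObsClassify (gapL : List Char) (p : Char × Char) : List (Char × Option (List Char)) :=
  if [p.1] = gapL then [(p.1, some pvGREEN)]
  else if [p.2] = gapL then []
  else if p.1 ≠ p.2 then [(p.1, some pvBLUE)]
  else [(p.1, none)]

def pvExpClassify (gapL : List Char) (p : Char × Char) : List (Char × Option (List Char)) :=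
  if [p.1] = gapL then []
  else if [p.2] = gapL then [(p.2, some pvRED)]
  else if p.1 ≠ p.2 then [(p.2, some pvBLUE)]
  else [(p.2, none)]

-- render: group maximal runs of equal color; raw for plain runs, one span otherwise
def pvRender : List (Char × Option (List Char)) → List Char
  | [] => []
  | (c, col) :: rest =>
    (match col with
     | none => c :: (rest.takeWhile (fun t => t.2 == col)).map Prod.fst
     | some color => pvWrap (c :: (rest.takeWhile (fun t => t.2 == col)).map Prod.fst) color)
      ++ pvRender (rest.dropWhile (fun t => t.2 == col))
termination_by ts => ts.length
decreasing_by
  simp only [List.length_cons]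
  exact Nat.lt_succ_of_le (List.length_dropWhile_le _ _)

def build_comparison_strings_py_alt (obs : String) (exp : String) (gap : String) : String × String :=
  let pairs := List.zip obs.toList exp.toList
  let observed := pvRender (pairs.flatMap (pvObsClassify gap.toList))
  let expected := pvRender (pairs.flatMap (pvExpClassify gap.toList))
  if obs.toList.length > exp.toList.length then
    (String.ofList (observed ++ pvWrap (obs.toList.drop exp.toList.length) pvBLUE), String.ofList expected)
  else if exp.toList.length > obs.toList.length then
    (String.ofList observed, String.ofList (expected ++ pvWrap (exp.toList.drop obs.toList.length) pvBLUE))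
  else (String.ofList observed, String.ofList expected)

-- ===== PRECONDITION & SPEC =====
def Spec_build_comparison_strings_py (obs : String) (exp : String) (gap : String) (out : String × String) : Prop := out = build_comparison_strings_py_alt obs exp gap
instance (obs : String) (exp : String) (gap : String) (out : String × String) : Decidable (Spec_build_comparison_strings_py obs exp gap out) := by unfold Spec_build_comparison_strings_py; infer_instance

-- ===== CLAIM (what is proved, stated in full; the proofs are below) =====
def Claim_equal_build_comparison_strings_py : Prop := ∀ (obs : String) (exp : String) (gap : String), Dom_build_comparison_strings_py obs exp gap → Spec_build_comparison_strings_py obs exp gap (build_comparison_strings_py obs exp gap)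

-- ===== LEMMAS AND PROOFS =====

-- one token step of the run-accumulating machine (proof device relating A to B's tokens)
def pvTStep (st : List Char × List Char × Option (List Char)) (t : Char × Option (List Char)) :
    List Char × List Char × Option (List Char) :=
  match t with
  | (c, none) => (pvFlush st.1 st.2.1 st.2.2 ++ [c], [], none)
  | (c, some colr) =>
    if st.2.2 ≠ some colr then (pvFlush st.1 st.2.1 st.2.2, [c], some colr)
    else (st.1, st.2.1 ++ [c], st.2.2)

def pvFinal (st : List Char × List Char × Option (List Char)) : List Char :=
  pvFlush st.1 st.2.1 st.2.2

theorem pvStepA_factor (gapL : List Char)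
    (st : (List Char × List Char × Option (List Char)) × (List Char × List Char × Option (List Char)))
    (p : Char × Char) :
    pvStepA gapL st p
      = (List.foldl pvTStep st.1 (pvObsClassify gapL p),
         List.foldl pvTStep st.2 (pvExpClassify gapL p)) := by
  rcases st with ⟨⟨ob, ro, co⟩, ⟨ex, re, ce⟩⟩
  rcases p with ⟨o, e⟩
  simp only [pvStepA, pvObsClassify, pvExpClassify]
  split_ifs <;> simp_all [pvTStep, List.foldl]

theorem pvFoldl_pair (gapL : List Char) (ps : List (Char × Char))
    (a b : List Char × List Char × Option (List Char)) :
    List.foldl (pvStepA gapL) (a, b) ps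
      = (List.foldl (fun s p => List.foldl pvTStep s (pvObsClassify gapL p)) a ps,
         List.foldl (fun s p => List.foldl pvTStep s (pvExpClassify gapL p)) b ps) := by
  induction ps generalizing a b with
  | nil => rfl
  | cons p ps ih =>
    simp only [List.foldl_cons, pvStepA_factor]
    exact ih _ _

theorem pvRender_none_cons (c : Char) (rest : List (Char × Option (List Char))) :
    pvRender ((c, none) :: rest) = c :: pvRender rest := by
  cases rest with
  | nil => simp [pvRender]
  | cons d rest' =>
    rcases d with ⟨d, dcol⟩
    cases dcol with
    | none =>
      rw [pvRender, pvRender]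
      simp
    | some x =>
      rw [pvRender]
      simp

theorem pvRender_some_cons (c : Char) (colr : List Char) (rest : List (Char × Option (List Char))) :
    pvRender ((c, some colr) :: rest)
      = pvWrap (c :: (rest.takeWhile (fun t => t.2 == some colr)).map Prod.fst) colr
          ++ pvRender (rest.dropWhile (fun t => t.2 == some colr)) := by
  rw [pvRender]

-- the heart: the run-accumulating fold computes exactly the grouped render
theorem pvL (ts : List (Char × Option (List Char))) :
    (∀ out, pvFinal (List.foldl pvTStep (out, [], none) ts) = out ++ pvRender ts) ∧
    (∀ out run colr, run ≠ [] →
      pvFinal (List.foldl pvTStep (out, run, some colr) ts)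
        = out ++ pvWrap (run ++ (ts.takeWhile (fun t => t.2 == some colr)).map Prod.fst) colr
            ++ pvRender (ts.dropWhile (fun t => t.2 == some colr))) := by
  induction ts with
  | nil =>
    constructor
    · intro out; simp [pvFinal, pvFlush, pvRender]
    · intro out run colr h; simp [pvFinal, pvFlush, pvColorStr, h, pvRender]
  | cons t rest ih =>
    rcases t with ⟨c, tcol⟩
    constructor
    · intro out
      cases tcol with
      | none =>
        rw [List.foldl_cons]
        have : pvTStep (out, [], none) (c, none) = (out ++ [c], [], none) := by
          simp [pvTStep, pvFlush]
        rw [this, ih.1, pvRender_none_cons]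
        simp
      | some colr =>
        rw [List.foldl_cons]
        have : pvTStep (out, [], none) (c, some colr) = (out, [c], some colr) := by
          simp [pvTStep, pvFlush]
        rw [this, ih.2 out [c] colr (by simp), pvRender_some_cons]
        simp
    · intro out run colr h
      cases tcol with
      | none =>
        rw [List.foldl_cons]
        have : pvTStep (out, run, some colr) (c, none)
            = (out ++ pvWrap run colr ++ [c], [], none) := by
          simp [pvTStep, pvFlush, pvColorStr, h]
        rw [this, ih.1]
        simp [pvRender_none_cons]
      | some colr' =>
        by_cases hc : colr' = colr
        · subst hc
          rw [List.foldl_cons]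
          have : pvTStep (out, run, some colr') (c, some colr')
              = (out, run ++ [c], some colr') := by
            simp [pvTStep]
          rw [this, ih.2 out (run ++ [c]) colr' (by simp)]
          simp
        · rw [List.foldl_cons]
          have : pvTStep (out, run, some colr) (c, some colr')
              = (out ++ pvWrap run colr, [c], some colr') := by
            simp [pvTStep, pvFlush, pvColorStr, h, Ne.symm hc]
          rw [this, ih.2 _ [c] colr' (by simp)]
          have hbeq : ((some colr' : Option (List Char)) == some colr) = false := by
            simp [hc]
          simp [hbeq, pvRender_some_cons]

theorem pvSide (cls : Char × Char → List (Char × Option (List Char))) (ps : List (Char × Char)) :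
    pvFinal (List.foldl (fun s p => List.foldl pvTStep s (cls p)) ([], [], none) ps)
      = pvRender (ps.flatMap cls) := by
  rw [← List.foldl_flatMap, (pvL (ps.flatMap cls)).1]
  simp

-- ===== VERDICT (by name: the statement is the Claim_ definition above) =====
theorem build_comparison_strings_py_spec : Claim_equal_build_comparison_strings_py := by
  intro obs exp gap _
  unfold Spec_build_comparison_strings_py
  show build_comparison_strings_py obs exp gap = build_comparison_strings_py_alt obs exp gap
  simp only [build_comparison_strings_py, build_comparison_strings_py_alt]
  rw [pvFoldl_pair]
  have hO := pvSide (pvObsClassify gap.toList) (List.zip obs.toList exp.toList)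
  have hE := pvSide (pvExpClassify gap.toList) (List.zip obs.toList exp.toList)
  simp only [pvFinal] at hO hE
  rw [hO, hE]
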